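-- pv_equiv track=rewrite | github.com/shraddhaphalke27/deee | gensql.py | get_tables_for_columns
-- ===== SOURCE A (Python) =====
-- schema = {
--     "pdrmformula": ["FormulaStatus", "FormulaID"],
--     "pdrmrawmaterial": ["RawMaterialID", "RawMaterialStatus", "PrimaryFunction"],
--     "pdrmrawmaterialformulamapping": ["FormulaID", "RawMaterialID"],
--     "pdrmrawmaterialregionmapping": ["Region", "RawMaterialID"],
--     "pdrmrawmaterialsuppliercost": ["RawMaterial", "Supplier", "PerKgCost"]
-- }
--
-- def get_tables_for_columns(columns):
--     """Helper function to determine which tables contain the given columns."""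
--     tables = set()
--     for column in columns:
--         for table, cols in schema.items():
--             if column in cols:
--                 tables.add(table)
--                 break
--     return tables
-- ===== SOURCE B (Python) =====
-- schema = {
--     "pdrmformula": ["FormulaStatus", "FormulaID"],
--     "pdrmrawmaterial": ["RawMaterialID", "RawMaterialStatus", "PrimaryFunction"],
--     "pdrmrawmaterialformulamapping": ["FormulaID", "RawMaterialID"],
--     "pdrmrawmaterialregionmapping": ["Region", "RawMaterialID"],
--     "pdrmrawmaterialsuppliercost": ["RawMaterial", "Supplier", "PerKgCost"]
-- }
--
-- # Inverted index: column name -> first table (in schema insertion order) containing it.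
-- _index = {}
-- for _table, _cols in schema.items():
--     for _col in _cols:
--         if _col not in _index:
--             _index[_col] = _table
--
-- def get_tables_for_columns(columns):
--     """Helper function to determine which tables contain the given columns."""
--     tables = set()
--     for column in columns:
--         table = _index.get(column)
--         if table is not None:
--             tables.add(table)
--     return tables
-- ===== Notes on version B (the rewrite author's own statement) =====
-- stated objective: faster
-- what changed: Replaces the per-column nested scan over the schema (with break) by a one-time inverted index dict mapping each column to its first containing table, so each query column is a single dict lookup instead of a scan.
import Mathlib
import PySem

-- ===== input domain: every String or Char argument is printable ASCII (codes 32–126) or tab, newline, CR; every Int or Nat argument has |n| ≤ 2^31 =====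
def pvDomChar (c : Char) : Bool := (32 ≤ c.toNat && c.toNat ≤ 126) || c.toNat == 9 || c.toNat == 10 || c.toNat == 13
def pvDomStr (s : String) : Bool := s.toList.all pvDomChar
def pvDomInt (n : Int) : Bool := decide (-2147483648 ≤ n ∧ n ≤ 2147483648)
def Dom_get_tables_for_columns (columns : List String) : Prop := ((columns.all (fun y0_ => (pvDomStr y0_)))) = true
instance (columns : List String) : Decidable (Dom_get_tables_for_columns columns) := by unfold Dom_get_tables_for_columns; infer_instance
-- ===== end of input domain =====

-- B replaces A's per-column scan over the schema (with break) by a precomputed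
-- inverted index (column -> first table containing it) and a flat lookup pass (idiomatic).

-- shared module constant: the schema dict (insertion order preserved)
def pvSchema : PySem.Dict String (List String) := PySem.Dict.ofList
  [ ("pdrmformula", ["FormulaStatus", "FormulaID"]),
    ("pdrmrawmaterial", ["RawMaterialID", "RawMaterialStatus", "PrimaryFunction"]),
    ("pdrmrawmaterialformulamapping", ["FormulaID", "RawMaterialID"]),
    ("pdrmrawmaterialregionmapping", ["Region", "RawMaterialID"]),
    ("pdrmrawmaterialsuppliercost", ["RawMaterial", "Supplier", "PerKgCost"]) ]

-- ===== PORT A =====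
-- inner 'for table, cols in schema.items(): if column in cols: tables.add(table); break'
def pvFindA (column : String) : List (String × List String) → PySem.Set String → PySem.Set String
  | [], tables => tables
  | (table, cols) :: rest, tables =>
      if cols.contains column then PySem.Set.add tables table
      else pvFindA column rest tables

def get_tables_for_columns (columns : List String) : List String :=
  columns.foldl (fun tables column => pvFindA column pvSchema.items tables) PySem.Set.empty

-- ===== PORT B =====
-- module-level inverted index: for each table's columns, record the table if the column is new
def pvIndex : PySem.Dict String String :=
  pvSchema.items.foldl
    (fun idx tc =>
      tc.2.foldl (fun idx col => if idx.contains col then idx else idx.insert col tc.1) idx)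
    PySem.Dict.empty

def get_tables_for_columns_alt (columns : List String) : List String :=
  columns.foldl
    (fun tables column =>
      match pvIndex.get? column with
      | some table => PySem.Set.add tables table
      | none => tables)
    PySem.Set.empty

-- ===== PRECONDITION & SPEC =====
def Spec_get_tables_for_columns (columns : List String) (out : List String) : Prop := out = get_tables_for_columns_alt columns
instance (columns : List String) (out : List String) : Decidable (Spec_get_tables_for_columns columns out) := by unfold Spec_get_tables_for_columns; infer_instance

-- ===== CLAIM (what is proved, stated in full; the proofs are below) =====
def Claim_equal_get_tables_for_columns : Prop := ∀ (columns : List String), Dom_get_tables_for_columns columns → Spec_get_tables_for_columns columns (get_tables_for_columns columns)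

-- ===== LEMMAS AND PROOFS =====

-- one table's columns folded into the index: a lookup hits iff it was already
-- present (unchanged) or the column is in this table's list (this table)
theorem pv_inner_get? (t : String) (cols : List String) (idx : PySem.Dict String String)
    (c : String) :
    (cols.foldl (fun idx col => if idx.contains col then idx else idx.insert col t) idx).get? c
      = match idx.get? c with
        | some v => some v
        | none => if cols.contains c then some t else none := by
  induction cols generalizing idx with
  | nil => cases h : idx.get? c <;> simp [h]
  | cons col rest ih =>
      simp only [List.foldl_cons]
      by_cases hc : idx.contains col
      · simp only [hc, if_true]
        rw [ih]
        cases h : idx.get? c with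
        | some v => rfl
        | none =>
            simp only []
            by_cases hce : c = col
            · subst hce
              rw [PySem.Dict.contains_eq_isSome_get?, h] at hc
              simp at hc
            · simp [hce]
      · simp only [hc, if_false, Bool.false_eq_true]
        rw [ih, PySem.Dict.get?_insert]
        by_cases hce : c = col
        · subst hce
          rw [if_pos rfl]
          rw [PySem.Dict.contains_eq_isSome_get?] at hc
          cases h : idx.get? c with
          | some v => rw [h] at hc; simp at hc
          | none => simp [List.contains_cons]
        · rw [if_neg hce]
          cases h : idx.get? c with
          | some v => rfl
          | none => simp [List.contains_cons, hce]

-- the full index lookup returns the first schema table containing the column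
theorem pv_index_get? (sch : List (String × List String)) (idx : PySem.Dict String String)
    (c : String) :
    (sch.foldl
      (fun idx tc =>
        tc.2.foldl (fun idx col => if idx.contains col then idx else idx.insert col tc.1) idx)
      idx).get? c
      = match idx.get? c with
        | some v => some v
        | none => (sch.find? (fun tc => tc.2.contains c)).map (·.1) := by
  induction sch generalizing idx with
  | nil => cases h : idx.get? c <;> simp [h]
  | cons tc rest ih =>
      simp only [List.foldl_cons]
      rw [ih, pv_inner_get?]
      cases h : idx.get? c with
      | some v => simp [h]
      | none =>
          simp only [h]
          by_cases hm : c ∈ tc.2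
          · simp [List.find?_cons, hm]
          · simp [List.find?_cons, hm]

-- A's inner loop, characterised by the same first-match
theorem pv_findA_eq (c : String) (sch : List (String × List String))
    (tables : PySem.Set String) :
    pvFindA c sch tables
      = match (sch.find? (fun tc => tc.2.contains c)).map (·.1) with
        | some t => PySem.Set.add tables t
        | none => tables := by
  induction sch with
  | nil => simp [pvFindA]
  | cons tc rest ih =>
      obtain ⟨t, cols⟩ := tc
      by_cases hm : c ∈ cols
      · simp [pvFindA, hm]
      · simp only [pvFindA, List.elem_eq_contains.symm]
        rw [if_neg (by simpa using hm), ih]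
        simp [hm]

-- per step, A's scan equals B's index lookup
theorem pv_step_eq (tables : PySem.Set String) (c : String) :
    pvFindA c pvSchema.items tables
      = match pvIndex.get? c with
        | some t => PySem.Set.add tables t
        | none => tables := by
  rw [pv_findA_eq]
  have : pvIndex.get? c = (pvSchema.items.find? (fun tc => tc.2.contains c)).map (·.1) := by
    rw [pvIndex, pv_index_get?]
    simp [PySem.Dict.get?_empty]
  rw [this]

-- ===== VERDICT (by name: the statement is the Claim_ definition above) =====
theorem get_tables_for_columns_spec : Claim_equal_get_tables_for_columns := by
  intro columns _
  unfold Spec_get_tables_for_columns get_tables_for_columns get_tables_for_columns_alt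
  exact PySem.List.foldl_congr_mem _ _ _ (fun tables c _ => pv_step_eq tables c) (l := columns)
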